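-- pv_equiv track=rewrite | github.com/dudung/python | src/apply/slemat/sle-mat.py | matrixA
-- ===== SOURCE A (Python) =====
-- def elemA(p, q, x, y):
--   sum = 0
--   for xi in x:
--     sum += xi**(p+q-2)
--   return sum
--
-- def matrixA(M, x, y):
--   mat = []
--   for p in range(M+1):
--     row = []
--     for q in range(M+1):
--       # Python list begins form 0
--       apq = elemA(p+1, q+1, x, y)
--       row.append(apq)
--     mat.append(row)
--   return mat
-- ===== SOURCE B (Python) =====
-- def matrixA(M, x, y):
--     n = M + 1
--     if n <= 0:
--         return []
--     # power sums S[k] = sum(xi**k for xi in x), k = 0 .. 2*M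
--     S = [0] * (2 * M + 1)
--     for xi in x:
--         power = 1
--         for k in range(len(S)):
--             S[k] += power
--             power *= xi
--     return [S[p:p + n] for p in range(n)]
-- ===== Notes on version B (the rewrite author's own statement) =====
-- stated objective: faster
-- what changed: B precomputes the power sums S[k]=sum(xi**k) for k=0..2M in one pass over x (running products instead of ** per cell) and forms each row as the slice S[p:p+M+1], instead of recomputing a power-sum from scratch for each of the (M+1)^2 cells.
import Mathlib
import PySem

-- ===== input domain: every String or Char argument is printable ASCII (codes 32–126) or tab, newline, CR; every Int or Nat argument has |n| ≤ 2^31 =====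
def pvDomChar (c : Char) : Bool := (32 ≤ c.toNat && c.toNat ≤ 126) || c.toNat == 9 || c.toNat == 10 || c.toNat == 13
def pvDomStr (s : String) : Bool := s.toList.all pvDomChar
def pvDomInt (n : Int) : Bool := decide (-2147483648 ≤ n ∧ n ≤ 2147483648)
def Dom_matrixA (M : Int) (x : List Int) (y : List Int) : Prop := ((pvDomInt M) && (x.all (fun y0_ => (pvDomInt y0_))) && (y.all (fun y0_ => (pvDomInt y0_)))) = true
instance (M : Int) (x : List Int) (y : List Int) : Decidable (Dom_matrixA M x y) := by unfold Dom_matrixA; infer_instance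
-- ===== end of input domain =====

-- B replaces A's per-cell power-sum recomputation by one precomputed power-sum table
-- S[k] = Σ xi^k (k = 0..2M) read off in slices: an asymptotic speed-up, same values.

-- ===== PORT A =====
-- xi**(p+q-2): every call passes p+1, q+1 with p,q ≥ 0, so the exponent is ≥ 0; .toNat is exact there
def elemA (p q : Int) (x y : List Int) : Int :=
  x.foldl (fun sum xi => sum + xi ^ (p + q - 2).toNat) 0

def matrixA (M : Int) (x : List Int) (y : List Int) : List (List Int) :=
  (PySem.List.pyRange 0 (M + 1) 1).foldl
    (fun mat p =>
      mat ++ [(PySem.List.pyRange 0 (M + 1) 1).foldl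
        (fun row q => row ++ [elemA (p + 1) (q + 1) x y]) []])
    []

-- ===== PORT B =====
-- the inner 'for k in range(len(S)): S[k] += power; power *= xi' loop, walking S front-to-back
def addPowers (xi power : Int) : List Int → List Int
  | [] => []
  | s :: rest => (s + power) :: addPowers xi (power * xi) rest

def matrixA_alt (M : Int) (x : List Int) (y : List Int) : List (List Int) :=
  let n := M + 1
  if n ≤ 0 then []
  else
    let S := x.foldl (fun S xi => addPowers xi 1 S) (List.replicate (2 * M + 1).toNat 0)
    (PySem.List.pyRange 0 n 1).map (fun p => PySem.List.slice S (some p) (some (p + n)))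

-- ===== PRECONDITION & SPEC =====
def Spec_matrixA (M : Int) (x : List Int) (y : List Int) (out : List (List Int)) : Prop := out = matrixA_alt M x y
instance (M : Int) (x : List Int) (y : List Int) (out : List (List Int)) : Decidable (Spec_matrixA M x y out) := by unfold Spec_matrixA; infer_instance

-- ===== CLAIM (what is proved, stated in full; the proofs are below) =====
def Claim_equal_matrixA : Prop := ∀ (M : Int) (x : List Int) (y : List Int), Dom_matrixA M x y → Spec_matrixA M x y (matrixA M x y)

-- ===== LEMMAS AND PROOFS =====

-- the common value: Σ_{xi ∈ x} xi^k
def powsum (x : List Int) (k : Nat) : Int := (x.map (fun xi => xi ^ k)).sum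

theorem elemA_eq_powsum (p q : Int) (x y : List Int) :
    elemA p q x y = powsum x (p + q - 2).toNat := by
  simp [elemA, powsum, PySem.List.foldl_add]

theorem matrixA_eq_map (M : Int) (x y : List Int) :
    matrixA M x y =
      (PySem.List.pyRange 0 (M + 1) 1).map (fun p =>
        (PySem.List.pyRange 0 (M + 1) 1).map (fun q => elemA (p + 1) (q + 1) x y)) := by
  unfold matrixA
  rw [PySem.List.foldl_append_singleton_eq_map, List.nil_append]
  refine List.map_congr_left (fun p _ => ?_)
  rw [PySem.List.foldl_append_singleton_eq_map, List.nil_append]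

theorem length_addPowers (xi power : Int) (S : List Int) :
    (addPowers xi power S).length = S.length := by
  induction S generalizing power with
  | nil => rfl
  | cons s rest ih => simp [addPowers, ih]

theorem getElem_addPowers (xi power : Int) (S : List Int) (k : Nat) (hk : k < S.length) :
    (addPowers xi power S)[k]'(by rw [length_addPowers]; exact hk) = S[k] + power * xi ^ k := by
  induction S generalizing power k with
  | nil => simp at hk
  | cons s rest ih =>
    cases k with
    | zero => simp [addPowers]
    | succ k =>
      simp only [addPowers, List.getElem_cons_succ]
      rw [ih (power * xi) k (by simpa using hk)]
      ring

theorem length_foldl_addPowers (x : List Int) (S0 : List Int) :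
    (x.foldl (fun S xi => addPowers xi 1 S) S0).length = S0.length := by
  induction x generalizing S0 with
  | nil => rfl
  | cons xi rest ih => simp [List.foldl_cons, ih, length_addPowers]

theorem getElem_foldl_addPowers (x : List Int) (S0 : List Int) (k : Nat) (hk : k < S0.length) :
    (x.foldl (fun S xi => addPowers xi 1 S) S0)[k]'(by rw [length_foldl_addPowers]; exact hk)
      = S0[k] + powsum x k := by
  induction x generalizing S0 with
  | nil => simp [powsum]
  | cons xi rest ih =>
    simp only [List.foldl_cons]
    rw [ih (addPowers xi 1 S0) (by rw [length_addPowers]; exact hk)]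
    rw [getElem_addPowers xi 1 S0 k hk]
    simp [powsum]
    ring

theorem getElem_S (x : List Int) (L k : Nat)
    (hL : k < (x.foldl (fun S xi => addPowers xi 1 S) (List.replicate L 0)).length) :
    (x.foldl (fun S xi => addPowers xi 1 S) (List.replicate L 0))[k] = powsum x k := by
  have hk : k < (List.replicate L (0 : Int)).length := by rwa [length_foldl_addPowers] at hL
  rw [getElem_foldl_addPowers x _ k hk]
  simp

theorem row_eq (M : Int) (x y : List Int) (j : Nat) (hj : (j : Int) < M + 1) :
    (PySem.List.pyRange 0 (M + 1) 1).map (fun q => elemA ((j : Int) + 1) (q + 1) x y)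
      = PySem.List.slice
          (x.foldl (fun S xi => addPowers xi 1 S) (List.replicate (2 * M + 1).toNat 0))
          (some (j : Int)) (some ((j : Int) + (M + 1))) := by
  have hM : 0 ≤ M := by omega
  obtain ⟨n, hn⟩ : ∃ n : Nat, M + 1 = (n : Int) := ⟨(M + 1).toNat, by omega⟩
  have hjn : j < n := by omega
  have hlen : (x.foldl (fun S xi => addPowers xi 1 S)
      (List.replicate (2 * M + 1).toNat 0)).length = (2 * M + 1).toNat := by
    rw [length_foldl_addPowers, List.length_replicate]
  rw [hn, PySem.List.slice_natCast_add, PySem.List.pyRange_one]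
  apply List.ext_getElem
  · simp [hlen]; omega
  · intro q h1 h2
    have hq : q < n := by simpa [hn] using h1
    simp only [List.getElem_map, List.getElem_take, List.getElem_drop, List.getElem_range]
    rw [elemA_eq_powsum, getElem_S x _ (j + q) (by rw [hlen]; omega)]
    congr 1
    omega

-- ===== VERDICT (by name: the statement is the Claim_ definition above) =====
theorem matrixA_spec : Claim_equal_matrixA := by
  intro M x y _
  unfold Spec_matrixA
  rw [matrixA_eq_map]
  by_cases h : M + 1 ≤ 0
  · simp [matrixA_alt, h, PySem.List.pyRange_one_eq_nil (by omega : M + 1 ≤ 0)]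
  · simp only [matrixA_alt, if_neg h]
    apply List.map_congr_left
    intro p hp
    rw [PySem.List.mem_pyRange_one] at hp
    obtain ⟨j, rfl⟩ : ∃ j : Nat, p = (j : Int) := ⟨p.toNat, by omega⟩
    exact row_eq M x y j hp.2
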